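-- pv_equiv track=rewrite | github.com/ValaryLim/finsearchIE | dyfinie/baselines/srl/srl_prediction.py | clean_pred_tags
-- ===== SOURCE A (Python) =====
-- def clean_pred_tags(gold_tags):
--     prev, left_tags, right_tags = -1, gold_tags.copy(), gold_tags.copy()
--
--     # left pass
--     for i in range(len(gold_tags)):
--         if gold_tags[i] == None:
--             left_tags[i] = prev
--         else:
--             left_tags[i] = gold_tags[i]
--             prev = gold_tags[i]
--
--     # right pass
--     prev = -1
--
--     for i in range(len(gold_tags)-1, -1, -1):
--         if gold_tags[i] == None:
--             right_tags[i] = prev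
--         else:
--             right_tags[i] = gold_tags[i]
--             prev = gold_tags[i]
--
--     cleaned_tags = []
--     for i in range(len(gold_tags)):
--         if left_tags[i] == right_tags[i]:
--             cleaned_tags.append(left_tags[i])
--         else:
--             cleaned_tags.append(-1)
--
--     return cleaned_tags
-- ===== SOURCE B (Python) =====
-- def clean_pred_tags(gold_tags):
--     # single forward pass: buffer each run of Nones, flush it when the next
--     # anchor (or end of list) is known; a None gets the left anchor iff both
--     # surrounding anchors agree (missing anchor counts as -1), else -1.
--     out = []
--     last = -1          # last non-None value seen (missing-left sentinel -1)
--     pending = 0        # length of the current run of Nones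
--     for v in gold_tags:
--         if v is None:
--             pending += 1
--         else:
--             fill = last if last == v else -1
--             out.extend([fill] * pending)
--             pending = 0
--             out.append(v)
--             last = v
--     # trailing Nones: right anchor missing (-1), so they agree only if last == -1,
--     # in which case the fill value is -1 anyway
--     out.extend([-1] * pending)
--     return out
-- ===== Notes on version B (the rewrite author's own statement) =====
-- stated objective: simpler
-- what changed: Replaces A's three list passes (left fill, backwards right fill, positionwise compare) with a single forward pass that buffers each run of Nones and flushes it once the next anchor (or the end) is known, deciding each fill by comparing the two surrounding anchors directly.
import Mathlib
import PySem

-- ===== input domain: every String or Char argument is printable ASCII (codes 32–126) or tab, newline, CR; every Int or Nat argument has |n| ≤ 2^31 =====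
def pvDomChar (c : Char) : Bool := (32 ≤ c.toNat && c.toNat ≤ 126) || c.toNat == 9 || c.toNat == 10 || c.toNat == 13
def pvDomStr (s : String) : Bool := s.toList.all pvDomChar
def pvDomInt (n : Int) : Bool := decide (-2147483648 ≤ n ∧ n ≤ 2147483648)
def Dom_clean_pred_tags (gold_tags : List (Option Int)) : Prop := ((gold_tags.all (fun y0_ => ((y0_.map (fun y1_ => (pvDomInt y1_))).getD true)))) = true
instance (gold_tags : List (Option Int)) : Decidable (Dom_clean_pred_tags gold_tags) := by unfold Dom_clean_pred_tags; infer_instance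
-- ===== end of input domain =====

-- B replaces A's three passes (left fill, right fill on the reversed list, compare)
-- by one forward pass buffering each run of Nones; objective: simpler (one pass).

-- ===== PORT A =====
-- forward fill carrying `prev` (the left/right passes of A; the right pass is this
-- same fill run over the reversed list and reversed back — index for index the same
-- assignments as the Python backwards index loop)
def fillFwd (prev : Int) : List (Option Int) → List Int
  | [] => []
  | none :: t => prev :: fillFwd prev t
  | some v :: t => v :: fillFwd v t

def clean_pred_tags (gold_tags : List (Option Int)) : List Int :=
  let left_tags := fillFwd (-1) gold_tags
  let right_tags := (fillFwd (-1) gold_tags.reverse).reverse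
  -- third loop: positionwise compare (lists have the input's length)
  List.zipWith (fun l r => if l = r then l else -1) left_tags right_tags

-- ===== PORT B =====
def goB (last : Int) (pending : Nat) : List (Option Int) → List Int
  | [] => List.replicate pending (-1)
  | none :: t => goB last (pending + 1) t
  | some v :: t =>
      List.replicate pending (if last = v then last else -1) ++ v :: goB v 0 t

def clean_pred_tags_alt (gold_tags : List (Option Int)) : List Int :=
  goB (-1) 0 gold_tags

-- ===== PRECONDITION & SPEC =====
def Spec_clean_pred_tags (gold_tags : List (Option Int)) (out : List Int) : Prop := out = clean_pred_tags_alt gold_tags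
instance (gold_tags : List (Option Int)) (out : List Int) : Decidable (Spec_clean_pred_tags gold_tags out) := by unfold Spec_clean_pred_tags; infer_instance

-- ===== CLAIM (what is proved, stated in full; the proofs are below) =====
def Claim_equal_clean_pred_tags : Prop := ∀ (gold_tags : List (Option Int)), Dom_clean_pred_tags gold_tags → Spec_clean_pred_tags gold_tags (clean_pred_tags gold_tags)

-- ===== LEMMAS AND PROOFS =====

-- first non-None value of the list, default p (the right anchor seen from the left)
def firstSomeD : List (Option Int) → Int → Int
  | [], p => p
  | none :: t, p => firstSomeD t p
  | some v :: _, _ => v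

-- state of `prev` after a forward fill run
def lastSt (p : Int) (xs : List (Option Int)) : Int := xs.foldl (fun a o => o.getD a) p

theorem fillFwd_append (xs : List (Option Int)) : ∀ (p : Int) (ys : List (Option Int)),
    fillFwd p (xs ++ ys) = fillFwd p xs ++ fillFwd (lastSt p xs) ys := by
  induction xs with
  | nil => intro p ys; simp [fillFwd, lastSt]
  | cons x t ih =>
    intro p ys
    cases x <;> simp [fillFwd, lastSt, List.foldl_cons, ih, Option.getD]

theorem lastSt_reverse (t : List (Option Int)) : ∀ p, lastSt p t.reverse = firstSomeD t p := by
  induction t with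
  | nil => intro p; simp [lastSt, firstSomeD]
  | cons x t ih =>
    intro p
    cases x <;> simp [lastSt, List.reverse_cons, List.foldl_append, Option.getD, firstSomeD] <;>
      simpa [lastSt] using ih p

-- the right pass, one step at a time
theorem right_some (v : Int) (t : List (Option Int)) :
    (fillFwd (-1) (some v :: t).reverse).reverse = v :: (fillFwd (-1) t.reverse).reverse := by
  simp [List.reverse_cons, fillFwd_append, fillFwd, lastSt_reverse]

theorem right_none (t : List (Option Int)) :
    (fillFwd (-1) ((none : Option Int) :: t).reverse).reverse
      = firstSomeD t (-1) :: (fillFwd (-1) t.reverse).reverse := by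
  simp only [List.reverse_cons, fillFwd_append, fillFwd, lastSt_reverse, List.reverse_append,
    List.reverse_cons, List.reverse_nil, List.nil_append, List.cons_append]

-- flushing the pending run: the fill value is determined by the two anchors
theorem goB_repl (t : List (Option Int)) : ∀ (last : Int) (pending : Nat),
    goB last pending t
      = List.replicate pending (if last = firstSomeD t (-1) then last else -1) ++ goB last 0 t := by
  induction t with
  | nil =>
    intro last pending
    simp only [goB, firstSomeD]
    split_ifs with h <;> simp [h]
  | cons x t ih =>
    intro last pending
    cases x with
    | none =>
      show goB last (pending + 1) t = _
      rw [ih last (pending + 1), List.replicate_add]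
      simp only [firstSomeD]
      rw [show goB last 0 (none :: t) = goB last 1 t from rfl, ih last 1]
      simp
    | some v => simp [goB, firstSomeD]

theorem main_eq (t : List (Option Int)) : ∀ prev,
    List.zipWith (fun l r => if l = r then l else -1)
      (fillFwd prev t) ((fillFwd (-1) t.reverse).reverse) = goB prev 0 t := by
  induction t with
  | nil => intro prev; simp [fillFwd, goB]
  | cons x t ih =>
    intro prev
    cases x with
    | none =>
      rw [right_none]
      show (if prev = firstSomeD t (-1) then prev else -1) ::
        List.zipWith _ (fillFwd prev t) ((fillFwd (-1) t.reverse).reverse) = _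
      rw [ih prev]
      rw [show goB prev 0 (none :: t) = goB prev 1 t from rfl, goB_repl t prev 1]
      simp
    | some v =>
      rw [right_some]
      show (if v = v then v else -1) ::
        List.zipWith _ (fillFwd v t) ((fillFwd (-1) t.reverse).reverse) = _
      rw [ih v]
      simp [goB]

-- ===== VERDICT (by name: the statement is the Claim_ definition above) =====
theorem clean_pred_tags_spec : Claim_equal_clean_pred_tags := by
  intro g _
  show clean_pred_tags g = clean_pred_tags_alt g
  unfold clean_pred_tags clean_pred_tags_alt
  exact main_eq g (-1)
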